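-- pv_equiv track=rewrite | github.com/MrBrantCode/unitest_baseline | mut_generate/mist_train_cf/cf_84386/solution.py | advanced_happy_string
-- ===== SOURCE A (Python) =====
-- def advanced_happy_string(s):
--     if len(s) < 3:
--         return False
--
--     # Build the list of 3-character substrings
--     substrings = [s[i:i+3] for i in range(len(s)-2)]
--
--     # Store each three-character substring and check condition
--     subsets = set()
--     for i in range(len(substrings)):
--         if substrings[i] in subsets:
--             return False # The same three-letter combination appears more than once
--
--         if i < len(substrings)-1 and substrings[i][2] == substrings[i+1][0]:
--             return False # Third character equal to the first character of next substring
--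
--         subsets.add(substrings[i])
--
--     return True
-- ===== SOURCE B (Python) =====
-- def advanced_happy_string(s):
--     n = len(s)
--     if n < 3:
--         return False
--     # overlap condition directly on characters: no two equal adjacent chars at positions 1..n-3
--     if any(s[i] == s[i + 1] for i in range(1, n - 2)):
--         return False
--     # duplicate trigrams found by sorting and scanning adjacent entries (no hash set)
--     tris = sorted(s[i:i + 3] for i in range(n - 2))
--     return all(a != b for a, b in zip(tris, tris[1:]))
-- ===== Notes on version B (the rewrite author's own statement) =====
-- stated objective: alternative
-- what changed: B drops A's membership-set loop over trigrams entirely: it tests the overlap condition directly on adjacent characters of s (no trigram pairs), and detects duplicate trigrams by sorting the trigram list and scanning adjacent entries instead of a seen-set lookup.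
import Mathlib
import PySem

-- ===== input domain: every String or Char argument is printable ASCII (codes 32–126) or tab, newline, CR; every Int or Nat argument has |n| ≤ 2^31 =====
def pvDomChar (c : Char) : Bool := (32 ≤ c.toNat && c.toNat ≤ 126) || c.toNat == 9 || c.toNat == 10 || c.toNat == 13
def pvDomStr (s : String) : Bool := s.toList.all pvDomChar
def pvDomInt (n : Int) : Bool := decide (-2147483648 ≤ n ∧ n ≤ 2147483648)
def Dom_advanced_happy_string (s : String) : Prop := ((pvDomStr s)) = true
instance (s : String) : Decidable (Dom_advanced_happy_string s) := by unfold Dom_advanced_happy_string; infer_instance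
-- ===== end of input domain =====

-- B checks the overlap condition directly on adjacent characters of s and finds duplicate
-- trigrams by sorting them and scanning adjacent entries, instead of A's single
-- interleaved early-return loop over trigrams with a membership set — alternative.

-- ===== PORT A =====
-- A's for-loop with its early returns: structural recursion over the remaining substrings,
-- carrying the 'subsets' set; 'i < len(substrings)-1' is 'rest nonempty', substrings[i+1] is rest's head.
def pvLoopA : List (List Char) → PySem.Set (List Char) → Bool
  | [], _ => true
  | x :: rest, seen =>
    if PySem.Set.contains seen x then false
    else if (match rest with
             | y :: _ => PySem.List.pyGet? x 2 == PySem.List.pyGet? y 0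
             | [] => false) then false
    else pvLoopA rest (PySem.Set.add seen x)

def advanced_happy_string (s : String) : Bool :=
  let cs := s.toList
  if cs.length < 3 then false
  else
    let substrings := (PySem.List.pyRange 0 ((cs.length : Int) - 2) 1).map
      (fun i => PySem.List.slice cs (some i) (some (i + 3)))
    pvLoopA substrings PySem.Set.empty

-- ===== PORT B =====
def advanced_happy_string_alt (s : String) : Bool :=
  let cs := s.toList
  let n := cs.length
  if n < 3 then false
  else if (PySem.List.pyRange 1 ((n : Int) - 2) 1).any
            (fun i => PySem.List.pyGet? cs i == PySem.List.pyGet? cs (i + 1)) then false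
  else
    let tris := PySem.List.sorted ((PySem.List.pyRange 0 ((n : Int) - 2) 1).map
        (fun i => PySem.List.slice cs (some i) (some (i + 3)))) (fun x => x) false
    (List.zip tris tris.tail).all (fun p => !(p.1 == p.2))

-- ===== PRECONDITION & SPEC =====
def Spec_advanced_happy_string (s : String) (out : Bool) : Prop := out = advanced_happy_string_alt s
instance (s : String) (out : Bool) : Decidable (Spec_advanced_happy_string s out) := by unfold Spec_advanced_happy_string; infer_instance

-- ===== CLAIM (what is proved, stated in full; the proofs are below) =====
def Claim_equal_advanced_happy_string : Prop := ∀ (s : String), Dom_advanced_happy_string s → Spec_advanced_happy_string s (advanced_happy_string s)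

-- ===== LEMMAS AND PROOFS =====

-- the overlap relation between consecutive trigrams
def pvOv (x y : List Char) : Prop := ¬ (PySem.List.pyGet? x 2 = PySem.List.pyGet? y 0)

-- A's loop returns true iff the trigrams are pairwise distinct, none is already seen,
-- and no consecutive pair violates the overlap condition
theorem pvLoopA_iff (l : List (List Char)) (seen : PySem.Set (List Char)) :
    pvLoopA l seen = true ↔ (l.Nodup ∧ (∀ x ∈ l, x ∉ seen) ∧ List.IsChain pvOv l) := by
  induction l generalizing seen with
  | nil => simp [pvLoopA]
  | cons x rest ih =>
    cases rest with
    | nil =>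
      by_cases hc : x ∈ seen <;> simp [pvLoopA, hc]
    | cons y t =>
      by_cases hc : x ∈ seen
      · simp [pvLoopA, hc]
      · by_cases ho : PySem.List.pyGet? x 2 = PySem.List.pyGet? y 0
        · simp only [pvLoopA]
          simp [ho, List.isChain_cons_cons, pvOv]
        · have hL : pvLoopA (x :: y :: t) seen = pvLoopA (y :: t) (PySem.Set.add seen x) := by
            simp [pvLoopA, hc, ho]
          rw [hL, ih]
          constructor
          · rintro ⟨hnd, hmem, hch⟩
            have hmem' : ∀ z ∈ y :: t, z ∉ seen ∧ z ≠ x := by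
              intro z hz
              have hz' := hmem z hz
              rw [PySem.Set.mem_add] at hz'
              exact ⟨fun h => hz' (Or.inl h), fun h => hz' (Or.inr h)⟩
            refine ⟨List.nodup_cons.mpr ⟨fun hx => (hmem' x hx).2 rfl, hnd⟩, ?_,
              List.isChain_cons_cons.mpr ⟨ho, hch⟩⟩
            intro z hz
            rcases List.mem_cons.mp hz with rfl | hz'
            · exact hc
            · exact (hmem' z hz').1
          · rintro ⟨hnd, hmem, hch⟩
            obtain ⟨hxnot, hnd'⟩ := List.nodup_cons.mp hnd
            refine ⟨hnd', ?_, (List.isChain_cons_cons.mp hch).2⟩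
            intro z hz
            rw [PySem.Set.mem_add]
            rintro (hzs | rfl)
            · exact hmem z (List.mem_cons.mpr (Or.inr hz)) hzs
            · exact hxnot hz
theorem pvEmpty_notMem (x : List Char) : x ∉ (PySem.Set.empty : PySem.Set (List Char)) := by
  simp [PySem.Set.empty]

-- adjacent-pairs 'all ≠' over zip is exactly IsChain (≠)
theorem pvZipAllNe_iff (t : List (List Char)) :
    ((List.zip t t.tail).all (fun p => !(p.1 == p.2)) = true) ↔ List.IsChain (· ≠ ·) t := by
  induction t with
  | nil => simp
  | cons x rest ih =>
    cases rest with
    | nil => simp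
    | cons y u =>
      simp only [List.tail_cons, List.zip_cons_cons, List.all_cons, List.isChain_cons_cons,
        Bool.and_eq_true, ← ih]
      simp

-- a sorted list has no adjacent duplicates iff the original list has no duplicates
theorem pvSortedChainNe_iff (l : List (List Char)) :
    List.IsChain (· ≠ ·) (PySem.List.sorted l (fun x => x) false) ↔ l.Nodup := by
  have hperm := PySem.List.sorted_perm l (fun x => x) false
  constructor
  · intro hch
    rw [← hperm.nodup_iff]
    have hp : (PySem.List.sorted l (fun x => x) false).Pairwise (fun a b => a ≤ b) := by
      have h := PySem.List.sorted_pairwise (κ := List Char) l (fun x => x)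
      convert h using 2
    have hle : ∀ (i : ℕ) (_ : i + 1 < (PySem.List.sorted l (fun x => x) false).length),
        (PySem.List.sorted l (fun x => x) false)[i] ≤ (PySem.List.sorted l (fun x => x) false)[i+1] := by
      intro i hi
      exact List.pairwise_iff_getElem.mp hp i (i+1) (by omega) hi (by omega)
    have hlt : List.IsChain (· < ·) (PySem.List.sorted l (fun x => x) false) := by
      rw [List.isChain_iff_getElem] at hch ⊢
      intro i hi
      exact lt_of_le_of_ne (hle i hi) (hch i hi)
    have : List.Pairwise (· < ·) (PySem.List.sorted l (fun x => x) false) :=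
      List.isChain_iff_pairwise.mp hlt
    exact this.imp ne_of_lt
  · intro hnd
    exact ((hperm.nodup_iff.mpr hnd).imp (fun h => h)).isChain

-- the trigram list, rewritten over Nat indices
theorem pvSubs_eq (cs : List Char) (h3 : 3 ≤ cs.length) :
    (PySem.List.pyRange 0 ((cs.length : Int) - 2) 1).map
        (fun i => PySem.List.slice cs (some i) (some (i + 3)))
      = (List.range (cs.length - 2)).map (fun j => (cs.drop j).take 3) := by
  have hc : ((cs.length : Int) - 2) = ((cs.length - 2 : Nat) : Int) := by omega
  rw [hc, PySem.List.pyRange_zero_natCast, List.map_map]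
  refine List.map_congr_left ?_
  intro k _
  show PySem.List.slice cs (some (k : Int)) (some ((k : Int) + 3)) = (cs.drop k).take 3
  exact_mod_cast PySem.List.slice_natCast_add cs k 3

-- reading one character of a trigram
theorem pvGet3 (cs : List Char) (j : ℕ) (i : ℤ) (h0 : 0 ≤ i) (hi : i < 3)
    (h : j + 3 ≤ cs.length) :
    PySem.List.pyGet? ((cs.drop j).take 3) i = some (cs[j + i.toNat]'(by omega)) := by
  have l3 : ((cs.drop j).take 3).length = 3 := by simp; omega
  rw [PySem.List.pyGet?_eq_some_getElem _ h0 (by rw [l3]; exact_mod_cast hi)]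
  congr 1
  simp [List.getElem_take, List.getElem_drop]

-- the overlap chain over trigrams is the character condition B tests
theorem pvChain_iff_chars (cs : List Char) (h3 : 3 ≤ cs.length) :
    List.IsChain pvOv ((PySem.List.pyRange 0 ((cs.length : Int) - 2) 1).map
        (fun i => PySem.List.slice cs (some i) (some (i + 3))))
      ↔ ∀ i : ℤ, 1 ≤ i → i < (cs.length : Int) - 2 →
          ¬ (PySem.List.pyGet? cs i = PySem.List.pyGet? cs (i + 1)) := by
  rw [pvSubs_eq cs h3, List.isChain_iff_getElem]
  simp only [List.length_map, List.length_range, List.getElem_map, List.getElem_range, pvOv]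
  constructor
  · intro h i h1 h2 heq
    set j := i.toNat with hjdef
    have hj1 : 1 ≤ j := by omega
    have hj2 : j < cs.length - 2 := by omega
    apply h (j - 1) (by omega)
    rw [pvGet3 cs (j - 1) 2 (by norm_num) (by norm_num) (by omega),
        pvGet3 cs (j - 1 + 1) 0 (by norm_num) (by norm_num) (by omega)]
    have e1 : j - 1 + (2 : ℤ).toNat = j + 1 := by omega
    have e2 : j - 1 + 1 + (0 : ℤ).toNat = j := by omega
    simp only [e1, e2]
    have g1 : PySem.List.pyGet? cs i = some (cs[j]'(by omega)) := by
      have hg := PySem.List.pyGet?_eq_some_getElem cs (i := i) (by omega) (by omega)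
      exact hg
    have g2 : PySem.List.pyGet? cs (i + 1) = some (cs[j + 1]'(by omega)) := by
      have hg := PySem.List.pyGet?_eq_some_getElem cs (i := i + 1) (by omega) (by omega)
      have e : (i + 1).toNat = j + 1 := by omega
      simp only [e] at hg
      exact hg
    rw [g1, g2] at heq
    exact heq.symm
  · intro h n hn heq
    rw [pvGet3 cs n 2 (by norm_num) (by norm_num) (by omega),
        pvGet3 cs (n + 1) 0 (by norm_num) (by norm_num) (by omega)] at heq
    apply h ((n + 1 : ℕ) : Int) (by exact_mod_cast Nat.le_add_left 1 n) (by push_cast; omega)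
    have a1 : PySem.List.pyGet? cs ((n + 1 : ℕ) : Int) = some (cs[n + 1]'(by omega)) := by
      have hg := PySem.List.pyGet?_eq_some_getElem cs (i := ((n + 1 : ℕ) : Int))
        (by positivity) (by push_cast; omega)
      have e : ((n + 1 : ℕ) : Int).toNat = n + 1 := by omega
      simp only [e] at hg
      exact hg
    have a2 : PySem.List.pyGet? cs (((n + 1 : ℕ) : Int) + 1) = some (cs[n + 2]'(by omega)) := by
      have hg := PySem.List.pyGet?_eq_some_getElem cs (i := ((n + 1 : ℕ) : Int) + 1)
        (by positivity) (by push_cast; omega)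
      have e : (((n + 1 : ℕ) : Int) + 1).toNat = n + 2 := by omega
      simp only [e] at hg
      exact hg
    rw [a1, a2]
    have e1 : n + (2 : ℤ).toNat = n + 2 := by omega
    have e2 : n + 1 + (0 : ℤ).toNat = n + 1 := by omega
    simp only [e1, e2] at heq
    exact heq.symm

-- B's 'any' test is the negation of that character condition
theorem pvAny_iff (cs : List Char) :
    ((PySem.List.pyRange 1 ((cs.length : Int) - 2) 1).any
        (fun i => PySem.List.pyGet? cs i == PySem.List.pyGet? cs (i + 1)) = false)
      ↔ ∀ i : ℤ, 1 ≤ i → i < (cs.length : Int) - 2 →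
          ¬ (PySem.List.pyGet? cs i = PySem.List.pyGet? cs (i + 1)) := by
  rw [← Bool.not_eq_true, List.any_eq_true]
  constructor
  · intro h i h1 h2 heq
    exact h ⟨i, PySem.List.mem_pyRange_one.mpr ⟨h1, h2⟩, by simpa using heq⟩
  · rintro h ⟨i, hmem, heq⟩
    rcases PySem.List.mem_pyRange_one.mp hmem with ⟨h1, h2⟩
    exact h i h1 h2 (by simpa using heq)

-- ===== VERDICT (by name: the statement is the Claim_ definition above) =====
theorem advanced_happy_string_spec : Claim_equal_advanced_happy_string := by
  intro s _
  unfold Spec_advanced_happy_string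
  show advanced_happy_string s = advanced_happy_string_alt s
  simp only [advanced_happy_string, advanced_happy_string_alt]
  by_cases h : s.toList.length < 3
  · rw [if_pos h, if_pos h]
  · rw [if_neg h, if_neg h]
    have h3 : 3 ≤ s.toList.length := by omega
    by_cases hA : (PySem.List.pyRange 1 ((s.toList.length : Int) - 2) 1).any
        (fun i => PySem.List.pyGet? s.toList i == PySem.List.pyGet? s.toList (i + 1)) = true
    · rw [if_pos hA]
      -- the overlap condition fails, so A's loop returns false too
      refine Bool.not_eq_true _ ▸ ?_
      rw [pvLoopA_iff]
      rintro ⟨-, -, hch⟩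
      rw [pvChain_iff_chars s.toList h3] at hch
      have hfalse := (pvAny_iff s.toList).mpr hch
      rw [hfalse] at hA
      exact Bool.false_ne_true hA
    · have hA' : _ = false := Bool.not_eq_true _ |>.mp hA
      rw [if_neg hA]
      rw [Bool.eq_iff_iff, pvLoopA_iff, pvZipAllNe_iff, pvSortedChainNe_iff]
      have hch : List.IsChain pvOv ((PySem.List.pyRange 0 ((s.toList.length : Int) - 2) 1).map
          (fun i => PySem.List.slice s.toList (some i) (some (i + 3)))) :=
        (pvChain_iff_chars s.toList h3).mpr ((pvAny_iff s.toList).mp hA')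
      constructor
      · rintro ⟨hnd, -, -⟩; exact hnd
      · intro hnd; exact ⟨hnd, fun x _ => pvEmpty_notMem x, hch⟩
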